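-- pv_equiv track=rewrite | github.com/dyou3968/Othello | gameFunctions.py | getFlippedState
-- ===== SOURCE A (Python) =====
-- def getFlippedInDirState(state, row, col, drow, dcol, turn):
--     if not (row in range(8) and col in range(8)):
--         return None
--     #Make sure to flip tokens before placing new one
--     if state[row][col] == turn:
--         return False
--     elif state[row][col] == 0:
--         return None
--     result = getFlippedInDirState(state, row + drow, col + dcol, drow, dcol, turn)
--     if result == None:
--         return None
--     elif result == False:
--         return [[row, col]]
--     else:
--         result.append([row, col])
--         return result
--
-- def getFlippedState(state, square, turn):
--     row,col = square
--     flipped = []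
--     for drow in range(-1, 2):
--         for dcol in range(-1, 2):
--             if not (drow == dcol == 0):
--                 result = getFlippedInDirState(state, row + drow, col + dcol, drow, dcol, turn)
--                 if result not in [False, None]: flipped += result
--     return flipped
-- ===== SOURCE B (Python) =====
-- def _walkFlips(state, r, c, dr, dc, turn):
--     acc = []
--     while 0 <= r < 8 and 0 <= c < 8:
--         v = state[r][c]
--         if v == turn:
--             acc.reverse()
--             return acc
--         if v == 0:
--             return []
--         acc.append([r, c])
--         r += dr
--         c += dc
--     return []
--
-- def getFlippedState(state, square, turn):
--     row, col = square
--     flipped = []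
--     for dr in (-1, 0, 1):
--         for dc in (-1, 0, 1):
--             if dr == 0 and dc == 0:
--                 continue
--             flipped += _walkFlips(state, row + dr, col + dc, dr, dc, turn)
--     return flipped
-- ===== Notes on version B (the rewrite author's own statement) =====
-- stated objective: simpler
-- what changed: The directional helper's far-to-near recursion with None/False sentinels is replaced by an iterative near-to-far walk with an accumulator that is reversed on success, returning a plain (possibly empty) list so the outer loop just concatenates.
import Mathlib
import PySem

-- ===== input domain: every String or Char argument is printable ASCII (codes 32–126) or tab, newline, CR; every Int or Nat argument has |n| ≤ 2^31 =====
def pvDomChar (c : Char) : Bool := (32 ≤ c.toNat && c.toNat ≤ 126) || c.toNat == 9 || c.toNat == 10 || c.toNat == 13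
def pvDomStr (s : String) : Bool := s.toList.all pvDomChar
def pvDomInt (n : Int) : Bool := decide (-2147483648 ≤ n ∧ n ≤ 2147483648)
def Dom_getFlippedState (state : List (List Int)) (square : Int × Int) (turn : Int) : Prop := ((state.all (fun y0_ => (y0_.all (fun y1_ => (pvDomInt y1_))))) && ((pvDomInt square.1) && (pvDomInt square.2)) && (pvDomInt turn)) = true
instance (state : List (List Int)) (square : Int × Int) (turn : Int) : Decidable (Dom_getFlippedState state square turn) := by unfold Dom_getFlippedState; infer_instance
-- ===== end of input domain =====

-- B replaces A's far-to-near recursion by an iterative near-to-far walk with an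
-- accumulator (reversed on success), merging the False/None sentinels into the
-- empty list; objective: simpler.

-- ===== PORT A =====
-- state[row][col]; exact under Pre_getFlippedState (every accessed cell is in range).
def pvCellAt (state : List (List Int)) (r c : Int) : Int :=
  PySem.List.pyGetD (PySem.List.pyGetD state r []) c 0

-- A's recursion; Python has no fuel, but with (drow,dcol) ≠ (0,0) the ray leaves
-- the 0..7 board after at most 8 in-range cells, so fuel 9 is never exhausted at
-- the call sites below.  none = Python None, some none = False, some (some l) = l.
def getFlippedInDirState (state : List (List Int)) (row col drow dcol turn : Int)
    (fuel : Nat) : Option (Option (List (List Int))) :=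
  match fuel with
  | 0 => none
  | fuel + 1 =>
    if ¬(0 ≤ row ∧ row < 8 ∧ 0 ≤ col ∧ col < 8) then none
    else if pvCellAt state row col = turn then some none
    else if pvCellAt state row col = 0 then none
    else
      match getFlippedInDirState state (row + drow) (col + dcol) drow dcol turn fuel with
      | none => none
      | some none => some (some [[row, col]])
      | some (some l) => some (some (l ++ [[row, col]]))

def getFlippedState (state : List (List Int)) (square : Int × Int) (turn : Int) : List (List Int) :=
  (PySem.List.pyRange (-1) 2 1).foldl (fun flipped drow =>
    (PySem.List.pyRange (-1) 2 1).foldl (fun flipped dcol =>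
      if ¬(drow = dcol ∧ dcol = 0) then
        match getFlippedInDirState state (square.1 + drow) (square.2 + dcol) drow dcol turn 9 with
        | some (some l) => flipped ++ l
        | _ => flipped
      else flipped) flipped) []

-- ===== PORT B =====
-- Source B's while loop as fuel recursion on the same state (acc, r, c); same fuel bound as A's port.
def pvWalkFlips (state : List (List Int)) (r c dr dc turn : Int)
    (acc : List (List Int)) (fuel : Nat) : List (List Int) :=
  match fuel with
  | 0 => []
  | fuel + 1 =>
    if 0 ≤ r ∧ r < 8 ∧ 0 ≤ c ∧ c < 8 then
      let v := pvCellAt state r c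
      if v = turn then acc.reverse
      else if v = 0 then []
      else pvWalkFlips state (r + dr) (c + dc) dr dc turn (acc ++ [[r, c]]) fuel
    else []

def getFlippedState_alt (state : List (List Int)) (square : Int × Int) (turn : Int) : List (List Int) :=
  ([-1, 0, 1] : List Int).foldl (fun flipped dr =>
    ([-1, 0, 1] : List Int).foldl (fun flipped dc =>
      if dr = 0 ∧ dc = 0 then flipped
      else flipped ++ pvWalkFlips state (square.1 + dr) (square.2 + dc) dr dc turn [] 9) flipped) []

-- ===== PRECONDITION & SPEC =====
-- Pre_ is exactly the inputs on which A raises no IndexError: along each of the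
-- 8 rays from `square`, whenever the walk's first k cells are in range, readable
-- and neither `turn` nor 0 and the (k+1)-st cell is on the 0..7 board, that cell
-- must be readable in `state`.
def pvInR8 (r c : Int) : Bool := decide (0 ≤ r ∧ r < 8 ∧ 0 ≤ c ∧ c < 8)
def pvRead (state : List (List Int)) (r c : Int) : Bool :=
  decide (r.toNat < state.length ∧ c.toNat < (state.getD r.toNat []).length)
def pvPreCell (state : List (List Int)) (r c : Int) : Int :=
  (state.getD r.toNat []).getD c.toNat 0
def Pre_getFlippedState (state : List (List Int)) (square : Int × Int) (turn : Int) : Prop :=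
  ∀ d ∈ ([(-1,-1),(-1,0),(-1,1),(0,-1),(0,1),(1,-1),(1,0),(1,1)] : List (Int × Int)),
  ∀ k ∈ List.range 8,
    ((∀ j ∈ List.range (k+1), pvInR8 (square.1 + ((j:Int)+1)*d.1) (square.2 + ((j:Int)+1)*d.2) = true) ∧
     (∀ j ∈ List.range k,
        pvRead state (square.1 + ((j:Int)+1)*d.1) (square.2 + ((j:Int)+1)*d.2) = true ∧
        pvPreCell state (square.1 + ((j:Int)+1)*d.1) (square.2 + ((j:Int)+1)*d.2) ≠ turn ∧
        pvPreCell state (square.1 + ((j:Int)+1)*d.1) (square.2 + ((j:Int)+1)*d.2) ≠ 0)) →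
    pvRead state (square.1 + ((k:Int)+1)*d.1) (square.2 + ((k:Int)+1)*d.2) = true
instance (state : List (List Int)) (square : Int × Int) (turn : Int) : Decidable (Pre_getFlippedState state square turn) := by unfold Pre_getFlippedState; infer_instance

def pvWitness_getFlippedState : List (List Int) × (Int × Int) × Int :=
  ([[0,0,0,0,0,0,0,0],[0,0,0,0,0,0,0,0],[0,0,0,0,0,0,0,0],
    [0,0,0,2,1,0,0,0],[0,0,0,1,2,0,0,0],[0,0,0,0,0,0,0,0],
    [0,0,0,0,0,0,0,0],[0,0,0,0,0,0,0,0]], ((2, 3), 2))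

def Spec_getFlippedState (state : List (List Int)) (square : Int × Int) (turn : Int) (out : List (List Int)) : Prop := out = getFlippedState_alt state square turn
instance (state : List (List Int)) (square : Int × Int) (turn : Int) (out : List (List Int)) : Decidable (Spec_getFlippedState state square turn out) := by unfold Spec_getFlippedState; infer_instance

-- ===== CLAIM (what is proved, stated in full; the proofs are below) =====
def Claim_equal_getFlippedState : Prop := ∀ (state : List (List Int)) (square : Int × Int) (turn : Int), Dom_getFlippedState state square turn → Pre_getFlippedState state square turn → Spec_getFlippedState state square turn (getFlippedState state square turn)

-- ===== LEMMAS AND PROOFS =====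

-- Loop invariant: the iterative walk with accumulator computes A's recursion,
-- with acc.reverse appended behind the collected (far-to-near) cells.
theorem pvWalk_eq (fuel : Nat) : ∀ (state : List (List Int)) (r c dr dc turn : Int)
    (acc : List (List Int)),
    pvWalkFlips state r c dr dc turn acc fuel =
      match getFlippedInDirState state r c dr dc turn fuel with
      | none => []
      | some none => acc.reverse
      | some (some l) => l ++ acc.reverse := by
  induction fuel with
  | zero => intro state r c dr dc turn acc; rfl
  | succ fuel ih =>
    intro state r c dr dc turn acc
    simp only [pvWalkFlips, getFlippedInDirState]
    by_cases hin : 0 ≤ r ∧ r < 8 ∧ 0 ≤ c ∧ c < 8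
    · simp only [hin]
      by_cases ht : pvCellAt state r c = turn
      · simp [ht]
      · simp only [ht, if_false]
        by_cases h0 : pvCellAt state r c = 0
        · simp [h0]
        · simp only [h0, if_false]
          rw [ih]
          cases getFlippedInDirState state (r + dr) (c + dc) dr dc turn fuel with
          | none => rfl
          | some o =>
            cases o with
            | none => simp
            | some l => simp
    · simp [hin]

-- Per-direction contribution (acc = []).
theorem pvWalk_nil (state : List (List Int)) (r c dr dc turn : Int) :
    pvWalkFlips state r c dr dc turn [] 9 =
      match getFlippedInDirState state r c dr dc turn 9 with
      | some (some l) => l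
      | _ => [] := by
  rw [pvWalk_eq]
  cases getFlippedInDirState state r c dr dc turn 9 with
  | none => rfl
  | some o => cases o with
    | none => rfl
    | some l => simp

theorem pvFoldl_ext {α β : Type} (f g : β → α → β) (h : ∀ b a, f b a = g b a) :
    ∀ (l : List α) (b : β), l.foldl f b = l.foldl g b := by
  intro l
  induction l with
  | nil => intro b; rfl
  | cons a l ih => intro b; simp only [List.foldl_cons, h, ih]

theorem pvRange_m1_2 : PySem.List.pyRange (-1) 2 1 = ([-1, 0, 1] : List Int) := by decide

-- ===== VERDICT (by name: the statement is the Claim_ definition above) =====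
theorem getFlippedState_spec : Claim_equal_getFlippedState := by
  intro state square turn _ _
  unfold Spec_getFlippedState getFlippedState getFlippedState_alt
  rw [pvRange_m1_2]
  apply pvFoldl_ext
  intro fl dr
  apply pvFoldl_ext
  intro fl dc
  by_cases h : dr = 0 ∧ dc = 0
  · simp [h.1, h.2]
  · have h' : ¬(dr = dc ∧ dc = 0) := by
      rintro ⟨h1, h2⟩; exact h ⟨by omega, h2⟩
    simp only [h, if_false, if_pos h', pvWalk_nil]
    cases getFlippedInDirState state (square.1 + dr) (square.2 + dc) dr dc turn 9 with
    | none => simp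
    | some o => cases o with
      | none => simp
      | some l => rfl
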